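-- pv_equiv track=rewrite | github.com/Tuyen4897/ToolDownloadYoutube | auto_follow.py | infer_label
-- ===== SOURCE A (Python) =====
-- from typing import Any, Dict, Iterable, List, Optional
--
-- def infer_label(channel: Dict[str, Any]) -> str:
--     if "label" in channel and channel["label"]:
--         return str(channel["label"])
--     url = str(channel["url"])
--     for segment in reversed(url.rstrip("/").split("/")):
--         if segment:
--             return segment
--     return url
-- ===== SOURCE B (Python) =====
-- def infer_label(channel):
--     if "label" in channel and channel["label"]:
--         return str(channel["label"])
--     url = str(channel["url"])
--     seg = []
--     for ch in reversed(url):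
--         if ch == "/":
--             if seg:
--                 break
--         else:
--             seg.append(ch)
--     return "".join(reversed(seg)) if seg else url
-- ===== Notes on version B (the rewrite author's own statement) =====
-- stated objective: simpler
-- what changed: Replaces rstrip + split('/') + a loop over the reversed segment list by a single right-to-left character scan that skips trailing slashes and collects the last segment directly, with no intermediate strings or lists.
import Mathlib
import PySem

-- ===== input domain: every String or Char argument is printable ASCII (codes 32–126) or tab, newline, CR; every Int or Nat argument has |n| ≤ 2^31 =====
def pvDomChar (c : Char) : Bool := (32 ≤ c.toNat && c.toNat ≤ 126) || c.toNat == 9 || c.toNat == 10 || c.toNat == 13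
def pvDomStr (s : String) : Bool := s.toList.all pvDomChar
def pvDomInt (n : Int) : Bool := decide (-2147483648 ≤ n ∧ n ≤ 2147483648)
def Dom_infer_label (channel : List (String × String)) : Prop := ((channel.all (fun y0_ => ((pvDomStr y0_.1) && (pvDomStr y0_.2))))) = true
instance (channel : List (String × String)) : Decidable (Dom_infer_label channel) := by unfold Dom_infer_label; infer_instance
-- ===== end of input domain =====

-- B replaces rstrip("/") + split("/") + a loop over the reversed segments by one right-to-left
-- character scan collecting the last non-empty segment directly (objective: simpler).


-- ===== PORT A =====
-- url.rstrip("/"): not a PySem primitive; hand port, exact — removes exactly the trailing '/' characters.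
def rstripSlash (cs : List Char) : List Char := (cs.reverse.dropWhile (fun c => c == '/')).reverse

-- A's loop: 'for segment in reversed(...): if segment: return segment' (none = loop fell through)
def findSeg : List (List Char) → Option (List Char)
  | [] => none
  | s :: rest => if s ≠ [] then some s else findSeg rest

-- A after the label guard; the 'none' branch of channel["url"] is a KeyError, excluded by Pre_
def inferFromUrl (channel : List (String × String)) : String :=
  match (PySem.Dict.mk channel).get? "url" with
  | none => ""
  | some url =>
    match findSeg ((PySem.Chars.splitOn (rstripSlash url.toList) ['/']).reverse) with
    | some seg => String.ofList seg
    | none => url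

def infer_label (channel : List (String × String)) : String :=
  match (PySem.Dict.mk channel).get? "label" with
  | some v => if v ≠ "" then v else inferFromUrl channel
  | none => inferFromUrl channel

-- ===== PORT B =====
-- Source B's reversed-character loop: seg accumulator; on '/' break if seg is non-empty, else skip
def segLoop (seg : List Char) : List Char → List Char
  | [] => seg
  | c :: rest =>
      if c = '/' then (if seg ≠ [] then seg else segLoop seg rest)
      else segLoop (seg ++ [c]) rest

-- B after the label guard; the 'none' branch of channel["url"] is a KeyError, excluded by Pre_
def altFromUrl (channel : List (String × String)) : String :=
  match (PySem.Dict.mk channel).get? "url" with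
  | none => ""
  | some url =>
    let seg := segLoop [] url.toList.reverse
    if seg ≠ [] then String.ofList seg.reverse else url

def infer_label_alt (channel : List (String × String)) : String :=
  match (PySem.Dict.mk channel).get? "label" with
  | some v => if v ≠ "" then v else altFromUrl channel
  | none => altFromUrl channel

-- ===== PRECONDITION & SPEC =====
-- Pre_ excludes exactly the inputs where A raises KeyError: no truthy "label" and no "url" key.
def Pre_infer_label (channel : List (String × String)) : Prop :=
  ((PySem.Dict.mk channel).get? "label").getD "" ≠ "" ∨ ((PySem.Dict.mk channel).get? "url").isSome = true
instance (channel : List (String × String)) : Decidable (Pre_infer_label channel) := by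
  unfold Pre_infer_label; infer_instance
def pvWitness_infer_label : (List (String × String)) := [("url", "http://a.example/chan/")]

def Spec_infer_label (channel : List (String × String)) (out : String) : Prop := out = infer_label_alt channel
instance (channel : List (String × String)) (out : String) : Decidable (Spec_infer_label channel out) := by unfold Spec_infer_label; infer_instance

-- ===== CLAIM (what is proved, stated in full; the proofs are below) =====
def Claim_equal_infer_label : Prop := ∀ (channel : List (String × String)), Dom_infer_label channel → Pre_infer_label channel → Spec_infer_label channel (infer_label channel)

-- ===== LEMMAS AND PROOFS =====

-- clean structural form of PySem.Chars.splitOn with separator ['/']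
def splitOn1 : List Char → List Char → List (List Char)
  | cur, [] => [cur]
  | cur, c :: rest => if c = '/' then cur :: splitOn1 [] rest else splitOn1 (cur ++ [c]) rest

theorem splitOn_go_spec : ∀ (fuel : Nat) (l cur : List Char) (_ : l.length ≤ fuel) (accs : List (List Char)),
    PySem.Chars.splitOn.go ['/'] fuel l cur accs = accs.reverse ++ splitOn1 cur.reverse l := by
  intro fuel
  induction fuel with
  | zero =>
      intro l cur h accs
      have hl : l = [] := List.eq_nil_of_length_eq_zero (Nat.le_zero.mp h)
      subst hl
      simp [PySem.Chars.splitOn.go, splitOn1]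
  | succ f ih =>
      intro l cur h accs
      cases l with
      | nil => simp [PySem.Chars.splitOn.go, splitOn1]
      | cons c rest =>
          by_cases hc : c = '/'
          · subst hc
            have h1 : PySem.Chars.splitOn.go ['/'] (f+1) ('/' :: rest) cur accs
                = PySem.Chars.splitOn.go ['/'] f rest [] (cur.reverse :: accs) := by
              simp [PySem.Chars.splitOn.go, List.isPrefixOf]
            rw [h1, ih rest [] (by simpa using Nat.le_of_succ_le_succ h) _]
            simp [splitOn1]
          · have h1 : PySem.Chars.splitOn.go ['/'] (f+1) (c :: rest) cur accs
                = PySem.Chars.splitOn.go ['/'] f rest (c :: cur) accs := by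
              have hb : ('/' == c) = false := by simp [Ne.symm hc]
              simp [PySem.Chars.splitOn.go, List.isPrefixOf, hb]
            rw [h1, ih rest (c :: cur) (by simpa using Nat.le_of_succ_le_succ h) _]
            simp [splitOn1, hc]

theorem splitOn_eq_splitOn1 (t : List Char) : PySem.Chars.splitOn t ['/'] = splitOn1 [] t := by
  have := splitOn_go_spec (t.length + 1) t [] (by omega) []
  simpa [PySem.Chars.splitOn] using this

theorem splitOn1_nil (cur : List Char) : splitOn1 cur [] = [cur] := rfl

theorem splitOn1_cons (cur : List Char) (c : Char) (rest : List Char) :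
    splitOn1 cur (c :: rest) = if c = '/' then cur :: splitOn1 [] rest else splitOn1 (cur ++ [c]) rest := rfl

theorem findSeg_append_some (xs ys : List (List Char)) (v : List Char)
    (h : findSeg xs = some v) : findSeg (xs ++ ys) = some v := by
  induction xs with
  | nil => simp [findSeg] at h
  | cons s rest ih =>
      simp only [List.cons_append, findSeg] at h ⊢
      split_ifs with hs
      · simpa [hs] using h
      · exact ih (by simpa [hs] using h)

theorem takeWhile_rev_append_of_mem (t : List Char) (c : Char) (hm : '/' ∈ t) :
    (t.reverse ++ [c]).takeWhile (fun c => !(c == '/')) = t.reverse.takeWhile (fun c => !(c == '/')) := by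
  rw [List.takeWhile_append]
  split_ifs with h
  · exfalso
    have hpre := List.takeWhile_prefix (l := t.reverse) (p := fun c => !(c == '/'))
    have heq := hpre.eq_of_length h
    have := (List.takeWhile_eq_self_iff).1 heq '/' (by simpa using hm)
    simp at this
  · rfl

theorem takeWhile_rev_of_not_mem (t : List Char) (hm : '/' ∉ t) :
    t.reverse.takeWhile (fun c => !(c == '/')) = t.reverse := by
  rw [List.takeWhile_eq_self_iff]
  intro x hx
  simp only [List.mem_reverse] at hx
  simp only [Bool.not_eq_eq_eq_not, Bool.not_true, beq_eq_false_iff_ne]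
  intro h; exact hm (h ▸ hx)

theorem findSeg_splitOn1 : ∀ (t cur : List Char), t ≠ [] → t.getLast? ≠ some '/' →
    findSeg ((splitOn1 cur t).reverse) =
      some (if '/' ∈ t then ((t.reverse.takeWhile (fun c => !(c == '/'))).reverse) else cur ++ t) := by
  intro t
  induction t with
  | nil => simp
  | cons c t' ih =>
      intro cur _ hlast
      cases t' with
      | nil =>
          have hc : c ≠ '/' := by simpa using hlast
          rw [splitOn1_cons, if_neg hc, splitOn1_nil,
            if_neg (show ¬ ('/' ∈ [c]) by simp [Ne.symm hc])]
          simp [findSeg]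
      | cons c2 t'' =>
          have hne : (c2 :: t'') ≠ ([] : List Char) := by simp
          have hlast' : (c2 :: t'').getLast? ≠ some '/' := by
            rw [List.getLast?_cons_cons] at hlast; exact hlast
          by_cases hc : c = '/'
          · subst hc
            rw [splitOn1_cons, if_pos rfl, List.reverse_cons, findSeg_append_some _ _ _ (ih [] hne hlast')]
            congr 1
            have ht : ('/' ∈ '/' :: c2 :: t'') := by simp
            have hrev : ('/' :: c2 :: t'').reverse = (c2 :: t'').reverse ++ ['/'] := by simp
            by_cases hm : '/' ∈ c2 :: t''
            · rw [if_pos hm, if_pos ht, hrev, takeWhile_rev_append_of_mem _ _ hm]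
            · rw [if_neg hm, if_pos ht, List.nil_append, hrev, List.takeWhile_append,
                if_pos (by rw [takeWhile_rev_of_not_mem _ hm])]
              simp
          · have hsp : splitOn1 cur (c :: c2 :: t'') = splitOn1 (cur ++ [c]) (c2 :: t'') := by
              simp [splitOn1, hc]
            rw [hsp, ih (cur ++ [c]) hne hlast']
            congr 1
            have hrev : (c :: c2 :: t'').reverse = (c2 :: t'').reverse ++ [c] := by simp
            by_cases hm : '/' ∈ c2 :: t''
            · rw [if_pos hm, if_pos (show '/' ∈ c :: c2 :: t'' from List.mem_cons_of_mem _ hm),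
                hrev, takeWhile_rev_append_of_mem _ _ hm]
            · rw [if_neg hm, if_neg (show ¬ '/' ∈ c :: c2 :: t'' from by
                simp [hm, Ne.symm hc])]
              simp

theorem segLoop_ne : ∀ (r seg : List Char), seg ≠ [] →
    segLoop seg r = seg ++ r.takeWhile (fun c => !(c == '/')) := by
  intro r
  induction r with
  | nil => intro seg _; simp [segLoop]
  | cons c rest ih =>
      intro seg hs
      by_cases hc : c = '/'
      · subst hc
        show (if '/' = '/' then (if seg ≠ [] then seg else segLoop seg rest)
              else segLoop (seg ++ ['/']) rest) = _
        rw [if_pos rfl, if_pos hs]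
        simp
      · show (if c = '/' then (if seg ≠ [] then seg else segLoop seg rest)
              else segLoop (seg ++ [c]) rest) = _
        rw [if_neg hc, ih (seg ++ [c]) (by simp)]
        simp [hc]

theorem segLoop_empty : ∀ (r : List Char),
    segLoop [] r = (r.dropWhile (fun c => c == '/')).takeWhile (fun c => !(c == '/')) := by
  intro r
  induction r with
  | nil => rfl
  | cons c rest ih =>
      by_cases hc : c = '/'
      · subst hc
        show (if '/' = '/' then (if ([] : List Char) ≠ [] then [] else segLoop [] rest)
              else segLoop ([] ++ ['/']) rest) = _
        rw [if_pos rfl, if_neg (by simp)]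
        simpa using ih
      · show (if c = '/' then (if ([] : List Char) ≠ [] then [] else segLoop [] rest)
              else segLoop ([] ++ [c]) rest) = _
        rw [if_neg hc, List.nil_append, segLoop_ne rest [c] (by simp)]
        simp [hc]

theorem core_eq (url : String) :
    (match findSeg ((PySem.Chars.splitOn (rstripSlash url.toList) ['/']).reverse) with
     | some seg => String.ofList seg
     | none => url)
    = (let seg := segLoop [] url.toList.reverse;
       if seg ≠ [] then String.ofList seg.reverse else url) := by
  rw [splitOn_eq_splitOn1]
  show _ = (if segLoop [] url.toList.reverse ≠ [] then String.ofList (segLoop [] url.toList.reverse).reverse else url)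
  rw [segLoop_empty]
  unfold rstripSlash
  cases hdw : url.toList.reverse.dropWhile (fun c => c == '/') with
  | nil =>
      simp [splitOn1_nil, findSeg]
  | cons d ds =>
      have hd : (d == '/') = false := by
        have h := List.head?_dropWhile_not (fun c => c == '/') url.toList.reverse
        rw [hdw] at h
        simpa using h
      have ht : (d :: ds).reverse ≠ [] := by simp
      have hl : ((d :: ds).reverse).getLast? ≠ some '/' := by
        rw [List.getLast?_reverse]
        simp only [List.head?_cons]
        intro hcon
        rw [Option.some.injEq] at hcon
        rw [hcon] at hd
        simp at hd
      rw [findSeg_splitOn1 _ [] ht hl]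
      have hval : (if '/' ∈ (d :: ds).reverse
            then ((((d :: ds).reverse).reverse.takeWhile (fun c => !(c == '/'))).reverse)
            else [] ++ (d :: ds).reverse)
          = ((d :: ds).takeWhile (fun c => !(c == '/'))).reverse := by
        by_cases hm : '/' ∈ (d :: ds).reverse
        · rw [if_pos hm, List.reverse_reverse]
        · rw [if_neg hm, List.nil_append]
          have := takeWhile_rev_of_not_mem _ hm
          rw [List.reverse_reverse] at this
          rw [this]
      rw [hval]
      have hne : (d :: ds).takeWhile (fun c => !(c == '/')) ≠ [] := by
        simp [hd]
      rw [if_pos hne]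

theorem from_url_eq (channel : List (String × String)) : inferFromUrl channel = altFromUrl channel := by
  unfold inferFromUrl altFromUrl
  cases (PySem.Dict.mk channel).get? "url" with
  | none => rfl
  | some url => exact core_eq url

-- ===== VERDICT (by name: the statement is the Claim_ definition above) =====
theorem infer_label_spec : Claim_equal_infer_label := by
  intro channel _ _
  unfold Spec_infer_label infer_label infer_label_alt
  cases (PySem.Dict.mk channel).get? "label" with
  | none => exact from_url_eq channel
  | some v =>
      by_cases hv : v = "" <;> simp [hv, from_url_eq channel]
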